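-- pv_equiv track=rewrite | github.com/Tomer23/advent-of-code-2021 | puzzle10/part_one copy.py | calculate_segment
-- ===== SOURCE A (Python) =====
-- def calculate_segment(segment):
--     y = [0, 0, 0, 0]  # ( [ { <
--     for x in segment:
--         if x == '(':
--             y[0] += 1
--         elif x == '[':
--             y[1] += 1
--         elif x == '{':
--             y[2] += 1
--         elif x == '<':
--             y[3] += 1
--         elif x == ')':
--             y[0] += -1
--         elif x == ']':
--             y[1] += -1
--         elif x == '}':
--             y[2] += -1
--         elif x == '>':
--             y[3] += -1
--     return y
-- ===== SOURCE B (Python) =====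
-- DELTAS = {'(': [1, 0, 0, 0], '[': [0, 1, 0, 0], '{': [0, 0, 1, 0], '<': [0, 0, 0, 1],
--           ')': [-1, 0, 0, 0], ']': [0, -1, 0, 0], '}': [0, 0, -1, 0], '>': [0, 0, 0, -1]}
--
-- def calculate_segment(segment):
--     # divide and conquer: balance of a string = vector sum of the balances of its halves
--     if len(segment) == 0:
--         return [0, 0, 0, 0]
--     if len(segment) == 1:
--         return DELTAS.get(segment, [0, 0, 0, 0])
--     mid = len(segment) // 2
--     left = calculate_segment(segment[:mid])
--     right = calculate_segment(segment[mid:])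
--     return [l + r for l, r in zip(left, right)]
-- ===== Notes on version B (the rewrite author's own statement) =====
-- stated objective: alternative
-- what changed: Replaced A's single left-to-right accumulator loop with an if/elif dispatch by a divide-and-conquer recursion: split the string in half, recurse on each half, and add the two balance vectors, with the single-character base case resolved by a delta table lookup.
import Mathlib
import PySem

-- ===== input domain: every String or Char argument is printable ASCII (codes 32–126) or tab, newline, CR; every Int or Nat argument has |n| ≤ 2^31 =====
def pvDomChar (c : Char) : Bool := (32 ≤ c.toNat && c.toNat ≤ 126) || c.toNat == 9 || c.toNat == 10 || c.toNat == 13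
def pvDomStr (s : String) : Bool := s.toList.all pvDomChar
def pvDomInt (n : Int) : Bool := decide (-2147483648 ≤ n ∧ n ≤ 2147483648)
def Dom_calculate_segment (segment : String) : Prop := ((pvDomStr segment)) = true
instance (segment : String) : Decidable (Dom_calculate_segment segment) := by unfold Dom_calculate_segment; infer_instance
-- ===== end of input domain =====

-- B replaces A's single accumulator loop with if/elif dispatch by a divide-and-conquer
-- recursion (split in half, add the two balance vectors; base case via a delta table); objective: alternative.

-- ===== PORT A =====
-- one step of A's loop body: the same if/elif chain, updating the four counters
def csStep (y : Int × Int × Int × Int) (x : Char) : Int × Int × Int × Int :=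
  if x = '(' then (y.1 + 1, y.2.1, y.2.2.1, y.2.2.2)
  else if x = '[' then (y.1, y.2.1 + 1, y.2.2.1, y.2.2.2)
  else if x = '{' then (y.1, y.2.1, y.2.2.1 + 1, y.2.2.2)
  else if x = '<' then (y.1, y.2.1, y.2.2.1, y.2.2.2 + 1)
  else if x = ')' then (y.1 + -1, y.2.1, y.2.2.1, y.2.2.2)
  else if x = ']' then (y.1, y.2.1 + -1, y.2.2.1, y.2.2.2)
  else if x = '}' then (y.1, y.2.1, y.2.2.1 + -1, y.2.2.2)
  else if x = '>' then (y.1, y.2.1, y.2.2.1, y.2.2.2 + -1)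
  else y

def calculate_segment (segment : String) : List Int :=
  let y := segment.toList.foldl csStep (0, 0, 0, 0)
  [y.1, y.2.1, y.2.2.1, y.2.2.2]

-- ===== PORT B =====
-- the DELTAS table of Source B (keys are the 1-character strings)
def csDeltas : PySem.Dict String (List Int) :=
  PySem.Dict.ofList [("(", [1, 0, 0, 0]), ("[", [0, 1, 0, 0]), ("{", [0, 0, 1, 0]), ("<", [0, 0, 0, 1]),
                     (")", [-1, 0, 0, 0]), ("]", [0, -1, 0, 0]), ("}", [0, 0, -1, 0]), (">", [0, 0, 0, -1])]

-- Source B's recursion, on the string's character list (segment[:mid]/segment[mid:] = take/drop at mid = len // 2)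
def csGo (l : List Char) : List Int :=
  if l.length = 0 then [0, 0, 0, 0]
  else if l.length = 1 then csDeltas.getD (String.ofList l) [0, 0, 0, 0]
  else
    let mid := l.length / 2
    let left := csGo (l.take mid)
    let right := csGo (l.drop mid)
    (left.zip right).map (fun p => p.1 + p.2)
termination_by l.length
decreasing_by
  · simp [List.length_take]; omega
  · simp [List.length_drop]; omega

def calculate_segment_alt (segment : String) : List Int := csGo segment.toList

-- ===== PRECONDITION & SPEC =====
def Spec_calculate_segment (segment : String) (out : List Int) : Prop := out = calculate_segment_alt segment
instance (segment : String) (out : List Int) : Decidable (Spec_calculate_segment segment out) := by unfold Spec_calculate_segment; infer_instance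

-- ===== CLAIM (what is proved, stated in full; the proofs are below) =====
def Claim_equal_calculate_segment : Prop := ∀ (segment : String), Dom_calculate_segment segment → Spec_calculate_segment segment (calculate_segment segment)

-- ===== LEMMAS AND PROOFS =====
-- the common characterisation: the four net counts of a character list
def csCounts (l : List Char) : List Int :=
  [(l.count '(' : Int) - (l.count ')' : Int),
   (l.count '[' : Int) - (l.count ']' : Int),
   (l.count '{' : Int) - (l.count '}' : Int),
   (l.count '<' : Int) - (l.count '>' : Int)]

theorem csStep_def (a b c d : Int) (x : Char) :
    csStep (a, b, c, d) x =
      if x = '(' then (a + 1, b, c, d)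
      else if x = '[' then (a, b + 1, c, d)
      else if x = '{' then (a, b, c + 1, d)
      else if x = '<' then (a, b, c, d + 1)
      else if x = ')' then (a + -1, b, c, d)
      else if x = ']' then (a, b + -1, c, d)
      else if x = '}' then (a, b, c + -1, d)
      else if x = '>' then (a, b, c, d + -1)
      else (a, b, c, d) := rfl

-- A's fold computes the four net counts
theorem csStep_foldl (l : List Char) (a b c d : Int) :
    l.foldl csStep (a, b, c, d) =
      (a + ((l.count '(' : Int) - (l.count ')' : Int)),
       b + ((l.count '[' : Int) - (l.count ']' : Int)),
       c + ((l.count '{' : Int) - (l.count '}' : Int)),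
       d + ((l.count '<' : Int) - (l.count '>' : Int))) := by
  induction l generalizing a b c d with
  | nil => simp
  | cons x xs ih =>
    rw [List.foldl_cons, csStep_def]
    split_ifs <;> rw [ih] <;> simp [*] <;> try ring

-- base case: the table lookup on a single character is its delta vector
theorem str1_beq_false (c d : Char) (h1 : ¬c = d) : ((String.ofList [d]) == String.ofList [c]) = false := by
  have h : ¬String.ofList [d] = String.ofList [c] := fun h => h1 (by
    have := congrArg String.toList h
    simpa using this.symm)
  simpa using h

theorem csGo_single (c : Char) :
    csDeltas.getD (String.ofList [c]) [0, 0, 0, 0] = csCounts [c] := by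
  by_cases h1 : c = '(' ; · subst h1; decide
  by_cases h2 : c = '[' ; · subst h2; decide
  by_cases h3 : c = '{' ; · subst h3; decide
  by_cases h4 : c = '<' ; · subst h4; decide
  by_cases h5 : c = ')' ; · subst h5; decide
  by_cases h6 : c = ']' ; · subst h6; decide
  by_cases h7 : c = '}' ; · subst h7; decide
  by_cases h8 : c = '>' ; · subst h8; decide
  have hit : csDeltas.items =
      [("(", [1, 0, 0, 0]), ("[", [0, 1, 0, 0]), ("{", [0, 0, 1, 0]), ("<", [0, 0, 0, 1]),
       (")", [-1, 0, 0, 0]), ("]", [0, -1, 0, 0]), ("}", [0, 0, -1, 0]), (">", [0, 0, 0, -1])] := by decide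
  simp [csCounts, PySem.Dict.getD, PySem.Dict.get?, hit,
        show ("(" : String) = String.ofList ['('] from by decide,
        show ("[" : String) = String.ofList ['['] from by decide,
        show ("{" : String) = String.ofList ['{'] from by decide,
        show ("<" : String) = String.ofList ['<'] from by decide,
        show (")" : String) = String.ofList [')'] from by decide,
        show ("]" : String) = String.ofList [']'] from by decide,
        show ("}" : String) = String.ofList ['}'] from by decide,
        show (">" : String) = String.ofList ['>'] from by decide,
        str1_beq_false _ _ h1, str1_beq_false _ _ h2, str1_beq_false _ _ h3, str1_beq_false _ _ h4,
        str1_beq_false _ _ h5, str1_beq_false _ _ h6, str1_beq_false _ _ h7, str1_beq_false _ _ h8,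
        h1, h2, h3, h4, h5, h6, h7, h8]

-- counts split over take/drop
theorem csCounts_split (l : List Char) (m : ℕ) :
    csCounts l = ((csCounts (l.take m)).zip (csCounts (l.drop m))).map (fun p => p.1 + p.2) := by
  simp [csCounts]
  have h : ∀ c : Char, l.count c = (l.take m).count c + (l.drop m).count c := by
    intro c
    conv_lhs => rw [← List.take_append_drop m l]
    exact List.count_append ..
  simp [h]; constructor <;> [skip; constructor <;> [skip; constructor]] <;> ring

-- B's recursion computes the four net counts
theorem csGo_eq (l : List Char) : csGo l = csCounts l := by
  fun_induction csGo l with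
  | case1 l h => rw [List.length_eq_zero_iff.mp h]; rfl
  | case2 l h h1 =>
    obtain ⟨c, rfl⟩ := List.length_eq_one_iff.mp h1
    exact csGo_single c
  | case3 l h h1 mid left right ihl ihr =>
    simp only [left, right, ihl, ihr]
    exact (csCounts_split l mid).symm

-- ===== VERDICT (by name: the statement is the Claim_ definition above) =====
theorem calculate_segment_spec : Claim_equal_calculate_segment := by
  intro segment _
  show _ = _
  rw [calculate_segment_alt, csGo_eq]
  simp [calculate_segment, csStep_foldl, csCounts]
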